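-- pv_equiv track=rewrite | github.com/svirgibs/context_tasks | context_tasks/rocks_from_mars.py | get_quantity_orders
-- ===== SOURCE A (Python) =====
-- class Rocks:
--     def __init__(self, weight: int, free: bool = True):
--         self.weight = weight
--         self.free = free
--
--     def __repr__(self):
--         return repr(self.weight)
--
-- def get_quantity_orders(
--         min_weight_list: list[int],
--         rocks_list: list[int]
-- ):
--     count = 0
--
--     min_weight_list = sorted(min_weight_list, reverse=True)
--
--     rocks_list = sorted(rocks_list, reverse=True)
--     rocks_list = [Rocks(x) for x in rocks_list]
--
--     for min_weight in min_weight_list: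
--         for rock in rocks_list:
--             if min_weight <= rock.weight and rock.free:
--                 count += 1
--                 rock.free = False
--                 break
--     return count
-- ===== SOURCE B (Python) =====
-- def get_quantity_orders(min_weight_list, rocks_list):
--     weights = sorted(min_weight_list, reverse=True)
--     rocks = sorted(rocks_list, reverse=True)
--     count = 0
--     j = 0
--     for w in weights:
--         if j < len(rocks) and rocks[j] >= w:
--             count += 1
--             j += 1
--     return count
-- ===== Notes on version B (the rewrite author's own statement) =====
-- stated objective: faster
-- what changed: Replaces the quadratic per-order scan over mutable rock objects by a two-pointer greedy over the two descending-sorted lists (the largest free rock is always the next unskipped one).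
import Mathlib
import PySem

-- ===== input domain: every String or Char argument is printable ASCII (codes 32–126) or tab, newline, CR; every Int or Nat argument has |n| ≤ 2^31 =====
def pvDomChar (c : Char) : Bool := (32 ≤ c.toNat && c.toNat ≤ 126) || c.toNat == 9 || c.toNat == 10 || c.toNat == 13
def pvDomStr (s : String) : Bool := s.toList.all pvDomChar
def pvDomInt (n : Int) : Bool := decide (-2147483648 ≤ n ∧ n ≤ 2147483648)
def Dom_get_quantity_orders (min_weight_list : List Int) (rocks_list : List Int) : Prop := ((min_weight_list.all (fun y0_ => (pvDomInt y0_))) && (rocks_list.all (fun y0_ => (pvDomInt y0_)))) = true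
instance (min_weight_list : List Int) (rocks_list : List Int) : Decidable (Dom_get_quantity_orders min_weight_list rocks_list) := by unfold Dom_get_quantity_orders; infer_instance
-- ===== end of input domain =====

-- B replaces A's per-order scan over mutable rock objects by a two-pointer greedy
-- over the two descending-sorted lists (asymptotically faster).

-- ===== PORT A =====
-- A rock is modelled as (weight, free); the inner 'for rock in rocks_list: … break'
-- returns the updated list on a match (some) and none when no rock matched.
def pvInnerA (w : Int) : List (Int × Bool) → Option (List (Int × Bool))
  | [] => none
  | (r, f) :: rest =>
    if w ≤ r ∧ f = true then some ((r, false) :: rest)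
    else (pvInnerA w rest).map (fun l => (r, f) :: l)

def pvLoopA : List Int → List (Int × Bool) → Int → Int
  | [], _, c => c
  | w :: ws, rl, c =>
    match pvInnerA w rl with
    | some rl' => pvLoopA ws rl' (c + 1)
    | none => pvLoopA ws rl c

def get_quantity_orders (min_weight_list : List Int) (rocks_list : List Int) : Int :=
  pvLoopA (PySem.List.sorted min_weight_list (fun x => x) true)
    ((PySem.List.sorted rocks_list (fun x => x) true).map (fun x => (x, true))) 0

-- ===== PORT B =====
-- Source B's index j into the sorted rocks is modelled by the remaining suffix st.2.
def pvStepB (st : Int × List Int) (w : Int) : Int × List Int :=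
  match st.2 with
  | r :: rest => if w ≤ r then (st.1 + 1, rest) else st
  | [] => st

def get_quantity_orders_alt (min_weight_list : List Int) (rocks_list : List Int) : Int :=
  let weights := PySem.List.sorted min_weight_list (fun x => x) true
  let rocks := PySem.List.sorted rocks_list (fun x => x) true
  (weights.foldl pvStepB (0, rocks)).1

-- ===== PRECONDITION & SPEC =====
def Spec_get_quantity_orders (min_weight_list : List Int) (rocks_list : List Int) (out : Int) : Prop := out = get_quantity_orders_alt min_weight_list rocks_list
instance (min_weight_list : List Int) (rocks_list : List Int) (out : Int) : Decidable (Spec_get_quantity_orders min_weight_list rocks_list out) := by unfold Spec_get_quantity_orders; infer_instance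

-- ===== CLAIM (what is proved, stated in full; the proofs are below) =====
def Claim_equal_get_quantity_orders : Prop := ∀ (min_weight_list : List Int) (rocks_list : List Int), Dom_get_quantity_orders min_weight_list rocks_list → Spec_get_quantity_orders min_weight_list rocks_list (get_quantity_orders min_weight_list rocks_list)

-- ===== LEMMAS AND PROOFS =====

-- no free rock is heavy enough ⇒ the inner scan matches nothing
lemma pvInnerA_none (w : Int) (fs : List Int) (h : ∀ x ∈ fs, ¬ w ≤ x) :
    pvInnerA w (fs.map (fun r => (r, true))) = none := by
  induction fs with
  | nil => rfl
  | cons r rs ih =>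
    simp only [List.map_cons, pvInnerA]
    rw [if_neg (by simp [h r (by simp)]), ih (fun x hx => h x (by simp [hx]))]
    rfl

-- the scan skips a prefix of taken rocks
lemma pvInnerA_false_prefix (w : Int) (ts : List Int) (l : List (Int × Bool)) :
    pvInnerA w (ts.map (fun r => (r, false)) ++ l)
      = (pvInnerA w l).map (fun l' => ts.map (fun r => (r, false)) ++ l') := by
  induction ts with
  | nil => simp
  | cons t ts ih =>
    simp only [List.map_cons, List.cons_append, pvInnerA]
    rw [if_neg (by simp), ih, Option.map_map]
    rfl

-- characterisation of one inner pass on the invariant state: taken rocks form a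
-- prefix, the free rocks are a descending suffix, so only its head can match
lemma pvInnerA_char (w : Int) (ts fs : List Int) (hs : fs.Pairwise (fun a b => b ≤ a)) :
    pvInnerA w (ts.map (fun r => (r, false)) ++ fs.map (fun r => (r, true)))
      = match fs with
        | [] => none
        | r :: rs => if w ≤ r then
            some ((ts ++ [r]).map (fun x => (x, false)) ++ rs.map (fun x => (x, true)))
          else none := by
  rw [pvInnerA_false_prefix]
  cases fs with
  | nil => rfl
  | cons r rs =>
    simp only [List.map_cons, pvInnerA]
    by_cases hw : w ≤ r
    · rw [if_pos (by simp [hw])]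
      simp [hw]
    · rw [if_neg (by simp [hw])]
      rw [pvInnerA_none w rs (fun x hx => by
        have := (List.pairwise_cons.mp hs).1 x hx; omega)]
      simp [hw]

-- the count accumulator of B's fold is additive in its start value
lemma pvFoldB_shift (ws : List Int) : ∀ (a b : Int) (fs : List Int),
    (ws.foldl pvStepB (a + b, fs)).1 = a + (ws.foldl pvStepB (b, fs)).1 := by
  induction ws with
  | nil => intro a b fs; rfl
  | cons w ws ih =>
    intro a b fs
    cases fs with
    | nil => simpa [pvStepB] using ih a b []
    | cons r rs =>
      by_cases hw : w ≤ r
      · simpa [pvStepB, hw, add_assoc] using ih a (b + 1) rs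
      · simpa [pvStepB, hw] using ih a b (r :: rs)

-- loop invariant: A's state is the taken prefix ++ free descending suffix, and the
-- free suffix is exactly B's remaining-rocks pointer
lemma pvLoop_eq (ws : List Int) : ∀ (ts fs : List Int) (c : Int),
    fs.Pairwise (fun a b => b ≤ a) →
    pvLoopA ws (ts.map (fun r => (r, false)) ++ fs.map (fun r => (r, true))) c
      = c + (ws.foldl pvStepB (0, fs)).1 := by
  induction ws with
  | nil => intro ts fs c _; simp [pvLoopA]
  | cons w ws ih =>
    intro ts fs c hs
    simp only [pvLoopA]
    rw [pvInnerA_char w ts fs hs]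
    cases fs with
    | nil =>
      simpa [pvStepB] using ih ts [] c hs
    | cons r rs =>
      have hrs : rs.Pairwise (fun a b => b ≤ a) := (List.pairwise_cons.mp hs).2
      by_cases hw : w ≤ r
      · simp only [if_pos hw]
        rw [ih (ts ++ [r]) rs (c + 1) hrs]
        have hsh := pvFoldB_shift ws 1 0 rs
        simp only [add_zero] at hsh
        simp only [List.foldl_cons]
        rw [show pvStepB (0, r :: rs) w = (1, rs) from by simp [pvStepB, hw]]
        omega
      · simp only [if_neg hw]
        rw [ih ts (r :: rs) c hs]
        simp [pvStepB, hw]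

-- ===== VERDICT (by name: the statement is the Claim_ definition above) =====
theorem get_quantity_orders_spec : Claim_equal_get_quantity_orders := by
  intro ml rl _
  unfold Spec_get_quantity_orders get_quantity_orders get_quantity_orders_alt
  have hs : (PySem.List.sorted rl (fun x => x) true).Pairwise (fun a b => b ≤ a) :=
    PySem.List.sorted_pairwise_rev rl (fun x => x)
  simpa using pvLoop_eq (PySem.List.sorted ml (fun x => x) true) []
    (PySem.List.sorted rl (fun x => x) true) 0 hs
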